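-- pv_equiv track=rewrite | github.com/helloelora/rl-quantum-circuit-routing | src/circuit_utils.py | build_dependency_graph
-- ===== SOURCE A (Python) =====
-- def build_dependency_graph(gates):
--     """
--     Build a dependency graph for a list of two-qubit gates.
--
--     A gate g_b depends on gate g_a if:
--     - g_a appears earlier in the gate list than g_b
--     - They share at least one qubit
--     - g_a is the most recent earlier gate on that shared qubit
--
--     Returns:
--         predecessors: dict mapping gate_index -> set of direct predecessor gate indices
--         successors: dict mapping gate_index -> set of direct successor gate indices
--     """
--     n_gates = len(gates)
--     predecessors = {i: set() for i in range(n_gates)}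
--     successors = {i: set() for i in range(n_gates)}
--
--     # For each qubit, track the most recent gate that used it
--     last_gate_on_qubit = {}
--
--     for i, (q_a, q_b) in enumerate(gates):
--         for q in (q_a, q_b):
--             if q in last_gate_on_qubit:
--                 pred = last_gate_on_qubit[q]
--                 predecessors[i].add(pred)
--                 successors[pred].add(i)
--             last_gate_on_qubit[q] = i
--
--     return predecessors, successors
-- ===== SOURCE B (Python) =====
-- def build_dependency_graph(gates):
--     # Flatten the circuit into the ordered list of qubit-usage events (slots),
--     # then resolve each slot's direct predecessor by searching backwards for
--     # the previous use of the same qubit -- no last-use tracking dict at all.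
--     slots = [(q, i) for i, pair in enumerate(gates) for q in pair]
--     n_gates = len(gates)
--     predecessors = {i: set() for i in range(n_gates)}
--     successors = {i: set() for i in range(n_gates)}
--     for k, (q, i) in enumerate(slots):
--         j = next((j2 for q2, j2 in reversed(slots[:k]) if q2 == q), None)
--         if j is not None:
--             predecessors[i].add(j)
--             successors[j].add(i)
--     return predecessors, successors
-- ===== Notes on version B (the rewrite author's own statement) =====
-- stated objective: alternative
-- what changed: A does one pass keeping a last-gate-per-qubit hash map; B flattens the circuit into an ordered list of qubit-usage slots and, for each slot, finds its direct predecessor by a backward search of the earlier slots for the previous use of the same qubit, with no last-use map at all.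
import Mathlib
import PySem

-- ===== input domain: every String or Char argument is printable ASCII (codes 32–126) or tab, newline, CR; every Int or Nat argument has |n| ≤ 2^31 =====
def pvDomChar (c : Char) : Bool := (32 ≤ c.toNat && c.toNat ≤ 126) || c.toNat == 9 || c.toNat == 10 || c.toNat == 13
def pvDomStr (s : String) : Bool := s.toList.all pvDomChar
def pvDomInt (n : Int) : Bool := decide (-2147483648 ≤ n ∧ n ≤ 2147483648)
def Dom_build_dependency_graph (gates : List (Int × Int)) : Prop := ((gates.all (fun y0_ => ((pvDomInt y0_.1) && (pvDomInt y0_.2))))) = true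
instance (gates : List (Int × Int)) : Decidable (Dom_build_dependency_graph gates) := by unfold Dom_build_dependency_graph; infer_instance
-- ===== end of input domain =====

-- B replaces A's last-gate-per-qubit hash map by a flattened list of qubit-usage slots with a
-- per-slot backward search for the previous use of the same qubit; objective: alternative.

-- ===== PORT A =====
-- {i: set() for i in range(n_gates)} — used verbatim by both Pythons
def pvEmptySets (n : Int) : PySem.Dict Int (PySem.Set Int) :=
  (PySem.List.pyRange 0 n 1).foldl (fun d i => d.insert i PySem.Set.empty) PySem.Dict.empty

-- body of A's 'for q in (q_a, q_b)' loop for one slot q of gate i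
def pvSlotA (i : Int)
    (st : PySem.Dict Int Int × (PySem.Dict Int (PySem.Set Int) × PySem.Dict Int (PySem.Set Int)))
    (q : Int) :
    PySem.Dict Int Int × (PySem.Dict Int (PySem.Set Int) × PySem.Dict Int (PySem.Set Int)) :=
  match st.1.get? q with
  | some p =>
      (st.1.insert q i,
       (st.2.1.modify i PySem.Set.empty (fun s => PySem.Set.add s p),
        st.2.2.modify p PySem.Set.empty (fun s => PySem.Set.add s i)))
  | none => (st.1.insert q i, st.2)

def build_dependency_graph (gates : List (Int × Int)) :
    (List (Int × List Int)) × (List (Int × List Int)) :=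
  let n_gates : Int := (gates.length : Int)
  let fin := (PySem.List.enumerate gates 0).foldl
    (fun st ig => pvSlotA ig.1 (pvSlotA ig.1 st ig.2.1) ig.2.2)
    (PySem.Dict.empty, (pvEmptySets n_gates, pvEmptySets n_gates))
  (fin.2.1.items, fin.2.2.items)

-- ===== PORT B =====
-- slots = [(q, i) for i, pair in enumerate(gates) for q in pair]
def pvSlots (gates : List (Int × Int)) : List (Int × Int) :=
  (PySem.List.enumerate gates 0).flatMap (fun ig => [(ig.2.1, ig.1), (ig.2.2, ig.1)])

-- next((j2 for q2, j2 in reversed(pre) if q2 == q), None)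
def pvPrevOn (pre : List (Int × Int)) (q : Int) : Option Int :=
  (pre.reverse.find? (fun s => s.1 == q)).map (·.2)

-- body of B's 'for k, (q, i) in enumerate(slots)' loop
def pvStepB (slots : List (Int × Int))
    (ps : PySem.Dict Int (PySem.Set Int) × PySem.Dict Int (PySem.Set Int))
    (ks : Int × (Int × Int)) :
    PySem.Dict Int (PySem.Set Int) × PySem.Dict Int (PySem.Set Int) :=
  match pvPrevOn (PySem.List.slice slots none (some ks.1)) ks.2.1 with
  | some j =>
      (ps.1.modify ks.2.2 PySem.Set.empty (fun s => PySem.Set.add s j),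
       ps.2.modify j PySem.Set.empty (fun s => PySem.Set.add s ks.2.2))
  | none => ps

def build_dependency_graph_alt (gates : List (Int × Int)) :
    (List (Int × List Int)) × (List (Int × List Int)) :=
  let slots := pvSlots gates
  let n_gates : Int := (gates.length : Int)
  let fin := (PySem.List.enumerate slots 0).foldl (pvStepB slots)
    (pvEmptySets n_gates, pvEmptySets n_gates)
  (fin.1.items, fin.2.items)

-- ===== PRECONDITION & SPEC =====
def Spec_build_dependency_graph (gates : List (Int × Int)) (out : (List (Int × List Int)) × (List (Int × List Int))) : Prop := out = build_dependency_graph_alt gates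
instance (gates : List (Int × Int)) (out : (List (Int × List Int)) × (List (Int × List Int))) : Decidable (Spec_build_dependency_graph gates out) := by unfold Spec_build_dependency_graph; infer_instance

-- ===== CLAIM =====
def Claim_equal_build_dependency_graph : Prop := ∀ (gates : List (Int × Int)), Dom_build_dependency_graph gates → Spec_build_dependency_graph gates (build_dependency_graph gates)

-- ===== LEMMAS AND PROOFS =====

-- A's fold over gates (two slots per gate) = a fold over the flattened slot list
theorem pvA_flatten (gs : List (Int × Int)) (i0 : Int)
    (st : PySem.Dict Int Int × (PySem.Dict Int (PySem.Set Int) × PySem.Dict Int (PySem.Set Int))) :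
    (PySem.List.enumerate gs i0).foldl
        (fun st ig => pvSlotA ig.1 (pvSlotA ig.1 st ig.2.1) ig.2.2) st
      = ((PySem.List.enumerate gs i0).flatMap
          (fun ig => [(ig.2.1, ig.1), (ig.2.2, ig.1)])).foldl
          (fun st s => pvSlotA s.2 st s.1) st := by
  induction gs generalizing i0 st with
  | nil => simp [PySem.List.enumerate_nil]
  | cons g gs ih =>
      rw [PySem.List.enumerate_cons]
      simp only [List.flatMap_cons, List.foldl_append, List.foldl_cons, List.foldl_nil]
      exact ih _ _

-- the invariant: B's enumerate-with-prefix-search fold computes exactly the graph part of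
-- A's slot fold, provided the last-use dict agrees with backward search over the done prefix
theorem pvMain (todo : List (Int × Int)) :
    ∀ (done : List (Int × Int)) (last : PySem.Dict Int Int)
      (ps : PySem.Dict Int (PySem.Set Int) × PySem.Dict Int (PySem.Set Int)),
    (∀ q, last.get? q = pvPrevOn done q) →
    ((PySem.List.enumerate todo ((done.length : Int))).foldl (pvStepB (done ++ todo)) ps)
      = (todo.foldl (fun st s => pvSlotA s.2 st s.1) (last, ps)).2 := by
  induction todo with
  | nil => intro done last ps h; simp [PySem.List.enumerate_nil]
  | cons s todo ih =>
      intro done last ps h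
      rw [PySem.List.enumerate_cons]
      simp only [List.foldl_cons]
      have hslice : PySem.List.slice (done ++ s :: todo) none (some ((done.length : Int)))
          = done := by
        rw [PySem.List.slice_to_natCast]
        simp
      have hstep : pvStepB (done ++ s :: todo) ps ((done.length : Int), s)
          = (pvSlotA s.2 (last, ps) s.1).2 := by
        unfold pvStepB pvSlotA
        simp only [hslice, h s.1]
        cases pvPrevOn done s.1 <;> rfl
      have hlast : (pvSlotA s.2 (last, ps) s.1).1 = last.insert s.1 s.2 := by
        unfold pvSlotA; cases last.get? s.1 <;> rfl
      have hinv : ∀ q, (last.insert s.1 s.2).get? q = pvPrevOn (done ++ [s]) q := by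
        intro q
        rw [PySem.Dict.get?_insert]
        unfold pvPrevOn
        rw [List.reverse_append]
        simp only [List.reverse_cons, List.reverse_nil, List.nil_append, List.cons_append,
          List.find?_cons]
        by_cases hq : q = s.1
        · simp [hq]
        · have hne : (s.1 == q) = false := by simp [Ne.symm hq]
          simp only [hq, hne, if_false]
          simpa [pvPrevOn] using h q
      have := ih (done ++ [s]) (last.insert s.1 s.2) (pvSlotA s.2 (last, ps) s.1).2 hinv
      rw [hstep]
      have hlen : ((done ++ [s]).length : Int) = (done.length : Int) + 1 := by
        simp
      rw [← hlen]
      have hl : done ++ s :: todo = (done ++ [s]) ++ todo := by simp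
      rw [hl]
      rw [this]
      rw [← hlast]

-- ===== VERDICT =====
theorem build_dependency_graph_spec : Claim_equal_build_dependency_graph := by
  intro gates _
  unfold Spec_build_dependency_graph build_dependency_graph build_dependency_graph_alt pvSlots
  dsimp only
  rw [pvA_flatten]
  have h := pvMain ((PySem.List.enumerate gates 0).flatMap
      (fun ig => [(ig.2.1, ig.1), (ig.2.2, ig.1)])) [] PySem.Dict.empty
    (pvEmptySets (gates.length : Int), pvEmptySets (gates.length : Int))
    (by intro q; rfl)
  simp only [List.length_nil, Int.natCast_zero, List.nil_append] at h
  rw [h]
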